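-- pv_equiv track=rewrite | github.com/edu-rinaldi/Python-Homework | Homework Python 2017-18/hw1/program03.py | creaCoppieChiave
-- ===== SOURCE A (Python) =====
-- def getSequenzaDisordinata(chiave):
--     """funzione che data una chiave ti restituisce la sequenza disordinata"""
--     chiaveDisordinata = []  #mi creo una lista dove andra la chiave disord.
--     for i in range(len(chiave)-1,-1,-1):    #scorro al contrario la stringa
--         if chiave[i] in chiaveDisordinata:    #se il carattere che trova a destra e' gia nella lista passa alla i successiva
--             continue
--         if not 'a'<= chiave[i] <= 'z':  #se il carattere non e' compreso tra 'a' e 'z' minuscole passa alla i successiva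
--             continue
--         chiaveDisordinata.append(chiave[i]) #se non entra in nessuno dei due if vuol dire che quel carattere non l'ha mai preso
--     return list(reversed(chiaveDisordinata))    #ritorna la lista al contrario
--
-- def getSequenzaOrdinata(chiave):    #funzione analoga a quella disordinata
--     """funzione che data una chiave ti restituisce la sequenza ordinata"""
--     chiaveOrdinata = []
--     for i in range(len(chiave) - 1, -1, -1):
--         if chiave[i] in chiaveOrdinata:
--             continue
--         if not 'a' <= chiave[i] <= 'z':
--             continue
--         chiaveOrdinata.append(chiave[i])
--     chiaveOrdinata.sort()
--     return chiaveOrdinata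
--
-- def creaCoppieChiave(chiave,codifica=True):
--     """funzione che crea le coppie tra chiave disord e ordinata in base all'operazione(che si passa tramite il par. codifica)"""
--     dizCoppie = {}  #creo un dizionario
--     seqOrd = getSequenzaOrdinata(chiave)    #creo una lista con la seq ordinata
--     seqDis = getSequenzaDisordinata(chiave) #creo una lista con la seq disordinata
--     lenSeq = len(seqOrd)    #mi salvo la lunghezza di una delle due sequenze(hanno stessa lunghezza)
--     for x in range(lenSeq):
--         if codifica:    #se bisogna codificare
--             dizCoppie[seqOrd[x]] = seqDis[x]    #avro un diz con chiave la seq ord. e attr. la seq disord.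
--         else:   #se bisogna decodificare
--             dizCoppie[seqDis[x]] = seqOrd[x]    #avro un diz con chiave la seq dis. e attr. la seq ord.
--     return dizCoppie    #ritorno il dizionario
-- ===== SOURCE B (Python) =====
-- def creaCoppieChiave(chiave, codifica=True):
--     # one forward pass: keep each lowercase letter once, moved to the end at
--     # every new occurrence, so seqDis lists letters by last occurrence
--     seqDis = []
--     for ch in chiave:
--         if 'a' <= ch <= 'z':
--             if ch in seqDis:
--                 seqDis.remove(ch)
--             seqDis.append(ch)
--     seqOrd = sorted(seqDis)
--     pairs = zip(seqOrd, seqDis) if codifica else zip(seqDis, seqOrd)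
--     return dict(pairs)
-- ===== Notes on version B (the rewrite author's own statement) =====
-- stated objective: idiomatic
-- what changed: B replaces A's two reversed index scans with membership-dedup plus a final reverse by a single forward move-to-end pass that directly yields the letters in last-occurrence order, and builds the result with dict(zip(...)) instead of an index loop.
import Mathlib
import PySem

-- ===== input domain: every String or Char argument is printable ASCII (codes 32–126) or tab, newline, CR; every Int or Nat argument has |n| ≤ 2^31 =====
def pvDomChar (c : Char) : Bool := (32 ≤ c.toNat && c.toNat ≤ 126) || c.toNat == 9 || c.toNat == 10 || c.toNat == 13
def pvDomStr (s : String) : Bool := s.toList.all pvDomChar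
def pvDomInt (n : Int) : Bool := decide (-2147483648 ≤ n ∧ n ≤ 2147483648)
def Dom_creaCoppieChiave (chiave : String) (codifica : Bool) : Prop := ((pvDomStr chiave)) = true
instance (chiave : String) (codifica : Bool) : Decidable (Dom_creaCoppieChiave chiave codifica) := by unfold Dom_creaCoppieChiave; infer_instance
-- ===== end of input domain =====

-- B replaces A's two reversed index scans + final reverse/sort by one forward
-- move-to-end pass over the string (idiomatic single pass; same asymptotic cost).
-- The 1-character strings Python indexes out of `chiave` are modelled as Char;
-- the returned dict's 1-character keys/values are rendered as Strings at the
-- end of both ports.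

-- ===== PORT A =====
-- loop body of getSequenzaDisordinata / getSequenzaOrdinata (identical in A)
def pvStepA (acc : List Char) (c : Char) : List Char :=
  if acc.contains c then acc
  else if ¬ ('a' ≤ c ∧ c ≤ 'z') then acc
  else acc ++ [c]

def getSequenzaDisordinata (chiave : String) : List Char :=
  ((PySem.List.pyRange (PySem.Str.len chiave - 1) (-1) (-1)).foldl
      (fun acc i => pvStepA acc (PySem.List.pyGetD chiave.toList i ' ')) []).reverse

def getSequenzaOrdinata (chiave : String) : List Char :=
  PySem.List.sorted
    ((PySem.List.pyRange (PySem.Str.len chiave - 1) (-1) (-1)).foldl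
      (fun acc i => pvStepA acc (PySem.List.pyGetD chiave.toList i ' ')) [])
    (fun c => c) false

def creaCoppieChiave (chiave : String) (codifica : Bool) : List (String × String) :=
  let seqOrd := getSequenzaOrdinata chiave
  let seqDis := getSequenzaDisordinata chiave
  let lenSeq := seqOrd.length
  ((PySem.List.pyRange 0 (lenSeq : Int) 1).foldl
      (fun d x =>
        if codifica then
          d.insert (PySem.List.pyGetD seqOrd x ' ') (PySem.List.pyGetD seqDis x ' ')
        else
          d.insert (PySem.List.pyGetD seqDis x ' ') (PySem.List.pyGetD seqOrd x ' '))
      PySem.Dict.empty).items.map (fun p => (String.ofList [p.1], String.ofList [p.2]))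

-- ===== PORT B =====
-- loop body of B's single forward pass (move the letter to the end)
def pvStepB (acc : List Char) (c : Char) : List Char :=
  if 'a' ≤ c ∧ c ≤ 'z' then
    (if acc.contains c then (PySem.List.remove? acc c).getD acc else acc) ++ [c]
  else acc

def creaCoppieChiave_alt (chiave : String) (codifica : Bool) : List (String × String) :=
  let seqDis := chiave.toList.foldl pvStepB []
  let seqOrd := PySem.List.sorted seqDis (fun c => c) false
  let pairs := if codifica then seqOrd.zip seqDis else seqDis.zip seqOrd
  (PySem.Dict.ofList pairs).items.map (fun p => (String.ofList [p.1], String.ofList [p.2]))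

-- ===== PRECONDITION & SPEC =====
def Spec_creaCoppieChiave (chiave : String) (codifica : Bool) (out : List (String × String)) : Prop := out = creaCoppieChiave_alt chiave codifica
instance (chiave : String) (codifica : Bool) (out : List (String × String)) : Decidable (Spec_creaCoppieChiave chiave codifica out) := by unfold Spec_creaCoppieChiave; infer_instance

-- ===== CLAIM (what is proved, stated in full; the proofs are below) =====
def Claim_equal_creaCoppieChiave : Prop := ∀ (chiave : String) (codifica : Bool), Dom_creaCoppieChiave chiave codifica → Spec_creaCoppieChiave chiave codifica (creaCoppieChiave chiave codifica)

-- ===== LEMMAS AND PROOFS =====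

-- the lowercase test of both programs, as a Bool predicate
def pvLow (c : Char) : Bool := decide ('a' ≤ c ∧ c ≤ 'z')

-- B's move-to-end step, in closed form
def pvMove (acc : List Char) (c : Char) : List Char :=
  (if c ∈ acc then acc.erase c else acc) ++ [c]

lemma pvMap_get (ys : List Char) (d : Char) :
    (List.range ys.length).map (fun k => ys.getD k d) = ys := by
  apply List.ext_getElem (by simp)
  intro i h1 h2
  simp [List.getD_eq_getElem?_getD, List.getElem?_eq_getElem h2]

-- A's reversed index loop `for i in range(len(ys)-1,-1,-1): … ys[i] …`
-- is the structural fold over ys.reverse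
lemma pvFoldl_rev {β : Type} (ys : List Char) (d : Char) (f : β → Char → β) (init : β) :
    (PySem.List.pyRange ((ys.length : Int) - 1) (-1) (-1)).foldl
        (fun acc i => f acc (PySem.List.pyGetD ys i d)) init
      = ys.reverse.foldl f init := by
  rw [PySem.List.pyRange_neg_one_eq_reverse]
  have h : (-1 : Int) + 1 = 0 := by norm_num
  have h2 : ((ys.length : Int) - 1) + 1 = (ys.length : Int) := by ring
  rw [h, h2, PySem.List.pyRange_zero_natCast, ← List.map_reverse, List.foldl_map]
  simp only [PySem.List.pyGetD_natCast]
  rw [← List.foldl_map, List.map_reverse, pvMap_get]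

lemma pvStepA_eq (acc : List Char) (c : Char) :
    pvStepA acc c = if pvLow c then PySem.Set.add acc c else acc := by
  simp only [pvStepA, pvLow, PySem.Set.add]
  by_cases h1 : acc.contains c <;> by_cases h2 : ('a' ≤ c ∧ c ≤ 'z') <;>
    simp [h2, PySem.Set.contains]

lemma pvRemove_mem (acc : List Char) (c : Char) (h : c ∈ acc) :
    PySem.List.remove? acc c = some (acc.erase c) := by
  induction acc with
  | nil => cases h
  | cons a t ih =>
    by_cases hac : a = c
    · subst hac
      simp [PySem.List.remove?, List.idxOf?_cons]
    · have hct : c ∈ t := by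
        cases h with
        | head => exact absurd rfl hac
        | tail _ h' => exact h'
      have := ih hct
      simp only [PySem.List.remove?, List.idxOf?_cons] at this ⊢
      have hbeq : (a == c) = false := by simp [hac]
      simp only [hbeq, Bool.false_eq_true, if_false]
      obtain ⟨k, hk, hek⟩ : ∃ k, List.idxOf? c t = some k ∧ t.eraseIdx k = t.erase c := by
        cases hidx : List.idxOf? c t with
        | none => simp [hidx] at this
        | some k =>
          refine ⟨k, rfl, ?_⟩
          simpa [hidx] using this
      simp [hk, hbeq, ← hek]

lemma pvStepB_eq (acc : List Char) (c : Char) :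
    pvStepB acc c = if pvLow c then pvMove acc c else acc := by
  simp only [pvStepB, pvLow, pvMove]
  by_cases h2 : ('a' ≤ c ∧ c ≤ 'z')
  · simp only [if_pos h2, decide_eq_true h2]
    by_cases h1 : c ∈ acc
    · rw [pvRemove_mem acc c h1]
      simp [h1]
    · simp [h1]
  · simp [h2]

-- closed form of B's forward pass: the untouched part of acc, then the
-- processed letters in last-occurrence order
lemma pvMove_closed (zs : List Char) : ∀ (acc : List Char), acc.Nodup →
    zs.foldl pvMove acc
      = acc.filter (fun x => decide (x ∉ zs)) ++ (PySem.Set.ofList zs.reverse).reverse := by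
  induction zs with
  | nil => intro acc _; simp [PySem.Set.ofList]
  | cons c t ih =>
    intro acc h
    rw [List.foldl_cons]
    have herase : acc.erase c = acc.filter (fun x => decide (x ≠ c)) := by
      rw [List.Nodup.erase_eq_filter h]
      apply List.filter_congr
      intro x _
      by_cases hxc : x = c
      · simp [hxc]
      · have hcx : c ≠ x := fun e => hxc e.symm
        simp [hxc, bne_iff_ne]
    have happ : ∀ (l : List Char), l.Nodup → c ∉ l → (l ++ [c]).Nodup := by
      intro l hl hcl
      rw [List.nodup_append]
      refine ⟨hl, List.nodup_singleton c, ?_⟩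
      intro a ha b hb
      rw [List.mem_singleton] at hb
      exact fun e => hcl ((e.trans hb) ▸ ha)
    have hnd : (pvMove acc c).Nodup := by
      unfold pvMove
      by_cases hc : c ∈ acc
      · rw [if_pos hc, herase]
        exact happ _ (List.Nodup.filter _ h) (by simp)
      · rw [if_neg hc]
        exact happ _ h hc
    rw [ih _ hnd]
    have hrev : PySem.Set.ofList (c :: t).reverse
        = PySem.Set.add (PySem.Set.ofList t.reverse) c := by
      rw [List.reverse_cons, PySem.Set.ofList_eq_foldl, List.foldl_append,
        ← PySem.Set.ofList_eq_foldl]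
      rfl
    have hmem : c ∈ PySem.Set.ofList t.reverse ↔ c ∈ t := by
      rw [PySem.Set.mem_ofList, List.mem_reverse]
    by_cases hct : c ∈ t
    · have hadd : PySem.Set.add (PySem.Set.ofList t.reverse) c = PySem.Set.ofList t.reverse := by
        simp [PySem.Set.add, PySem.Set.contains, hmem.mpr hct]
      rw [hrev, hadd]
      congr 1
      by_cases hc : c ∈ acc
      · simp only [pvMove, if_pos hc, List.filter_append]
        rw [herase, List.filter_filter]
        have hone : List.filter (fun x => decide (x ∉ t)) [c] = [] := by simp [hct]
        rw [hone, List.append_nil]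
        apply List.filter_congr
        intro x _
        by_cases h1 : x = c <;> by_cases h2 : x ∈ t <;> simp [h1, h2, hct]
      · simp only [pvMove, if_neg hc, List.filter_append]
        have hone : List.filter (fun x => decide (x ∉ t)) [c] = [] := by simp [hct]
        rw [hone, List.append_nil]
        apply List.filter_congr
        intro x hx
        have hxc : x ≠ c := fun e => hc (e ▸ hx)
        simp [hxc]
    · have hadd : PySem.Set.add (PySem.Set.ofList t.reverse) c
          = PySem.Set.ofList t.reverse ++ [c] := by
        simp [PySem.Set.add, PySem.Set.contains, hmem, hct]
      rw [hrev, hadd, List.reverse_append]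
      simp only [List.reverse_singleton, List.singleton_append]
      by_cases hc : c ∈ acc
      · simp only [pvMove, if_pos hc, List.filter_append]
        rw [herase, List.filter_filter]
        have hone : List.filter (fun x => decide (x ∉ t)) [c] = [c] := by simp [hct]
        rw [hone, List.append_assoc]
        simp only [List.singleton_append]
        congr 1
        apply List.filter_congr
        intro x _
        by_cases h1 : x = c <;> by_cases h2 : x ∈ t <;> simp [h1, h2, hct]
      · simp only [pvMove, if_neg hc, List.filter_append]
        have hone : List.filter (fun x => decide (x ∉ t)) [c] = [c] := by simp [hct]
        rw [hone, List.append_assoc]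
        simp only [List.singleton_append]
        congr 1
        apply List.filter_congr
        intro x hx
        have hxc : x ≠ c := fun e => hc (e ▸ hx)
        simp [hxc]

-- A's reversed scan accumulator
lemma pvRevAcc (ys : List Char) :
    ys.reverse.foldl pvStepA [] = PySem.Set.ofList ((ys.filter pvLow).reverse) := by
  have hfe : pvStepA = fun acc c => if pvLow c then PySem.Set.add acc c else acc := by
    funext acc c; exact pvStepA_eq acc c
  rw [hfe, ← List.foldl_filter, List.filter_reverse, ← PySem.Set.ofList_eq_foldl]

-- B's forward pass gives the same letters, reversed
lemma pvSeqDis_eq (ys : List Char) :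
    ys.foldl pvStepB [] = (PySem.Set.ofList ((ys.filter pvLow).reverse)).reverse := by
  have hfe : pvStepB = fun acc c => if pvLow c then pvMove acc c else acc := by
    funext acc c; exact pvStepB_eq acc c
  rw [hfe, ← List.foldl_filter, pvMove_closed _ [] List.nodup_nil]
  simp

lemma pvZip_getD {α β : Type} (d1 : α) (d2 : β) :
    ∀ (l1 : List α) (l2 : List β), l1.length = l2.length →
      (List.range l1.length).map (fun k => (l1.getD k d1, l2.getD k d2)) = l1.zip l2 := by
  intro l1
  induction l1 with
  | nil => intro l2 _; simp
  | cons a t ih =>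
    intro l2 h
    cases l2 with
    | nil => simp at h
    | cons b t2 =>
      simp only [List.length_cons, List.range_succ_eq_map, List.map_cons, List.map_map]
      simp only [List.getD_cons_zero, List.zip_cons_cons]
      congr 1
      have := ih t2 (by simpa using h)
      rw [← this]
      exact List.map_congr_left fun k _ => rfl

-- A's dict-building index loop is dict(zip(l1, l2))
lemma pvDictLoop (l1 l2 : List Char) (h : l1.length = l2.length) :
    (PySem.List.pyRange 0 (l1.length : Int) 1).foldl
        (fun d x => PySem.Dict.insert d (PySem.List.pyGetD l1 x ' ') (PySem.List.pyGetD l2 x ' '))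
        PySem.Dict.empty
      = PySem.Dict.ofList (l1.zip l2) := by
  rw [PySem.List.pyRange_zero_natCast, List.foldl_map]
  simp only [PySem.List.pyGetD_natCast]
  rw [PySem.Dict.ofList, PySem.Dict.update, ← pvZip_getD ' ' ' ' l1 l2 h, List.foldl_map]

-- ===== VERDICT (by name: the statement is the Claim_ definition above) =====
theorem creaCoppieChiave_spec : Claim_equal_creaCoppieChiave := by
  intro chiave codifica _
  unfold Spec_creaCoppieChiave creaCoppieChiave creaCoppieChiave_alt
    getSequenzaDisordinata getSequenzaOrdinata
  have hlen : PySem.Str.len chiave = (chiave.toList.length : Int) := rfl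
  rw [hlen, pvFoldl_rev chiave.toList ' ' pvStepA [], pvRevAcc, pvSeqDis_eq]
  have hord : PySem.List.sorted (PySem.Set.ofList ((chiave.toList.filter pvLow).reverse))
        (fun c => c) false
      = PySem.List.sorted (PySem.Set.ofList ((chiave.toList.filter pvLow).reverse)).reverse
        (fun c => c) false :=
    PySem.List.sorted_eq_sorted_of_perm _ _ _ (fun _ _ h => h)
      (List.reverse_perm _).symm
  rw [hord]
  set S := (PySem.Set.ofList ((chiave.toList.filter pvLow).reverse)).reverse with hSdef
  set seqOrd := PySem.List.sorted S (fun c => c) false with hOrd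
  have hl : seqOrd.length = S.length := PySem.List.length_sorted _ _ _
  cases codifica
  · simp only [Bool.false_eq_true, if_false]
    rw [show ((seqOrd.length : Int)) = ((S.length : Int)) by rw [hl],
      pvDictLoop S seqOrd hl.symm]
  · simp only [if_true]
    rw [pvDictLoop seqOrd S hl]
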